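-- pv_equiv track=rewrite | github.com/ib-hussain/writers-block | chatbots/FullAgents.py | _strip_assignment_lines_keep_canon
-- ===== SOURCE A (Python) =====
-- from typing import Tuple, Dict, Any, Optional
--
-- _CANON_VARS = [
--     "COMPANY_NAME",
--     "CALL_NUMBER",
--     "ADDRESS",
--     "STATE_NAME",
--     "LINK",
--     "COMPANY_EMPLOYEE",
--     "USER_MESSAGE",
-- ]
--
-- def _strip_assignment_lines_keep_canon(prompt: str) -> str:
--     """
--     Removes spammy/injected lines like 'COMPANY_EMPLOYEE = John' repeated many times.
--     Keeps only the last occurrence of each canonical var listed in _CANON_VARS.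
--     """
--     if not prompt:
--         return ""
--
--     lines = prompt.splitlines()
--     canon_last: Dict[str, str] = {}
--
--     # First pass: record last value for canonical vars
--     for line in lines:
--         s = line.strip()
--         for k in _CANON_VARS:
--             prefix = f"{k} ="
--             if s.startswith(prefix):
--                 canon_last[k] = s
--
--     # Second pass: remove ALL assignment-looking lines "WORD = ..."
--     # but keep canonical vars only once (appended at end).
--     kept: list[str] = []
--     for line in lines:
--         s = line.strip()
--         if " = " in s and s.split("=", 1)[0].strip().isidentifier():
--             # Drop all assignment-like lines from the main body
--             continue
--         kept.append(line)
--
--     # Append canonical vars at end (stable order) using last seen values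
--     kept.append("")
--     for k in _CANON_VARS:
--         if k in canon_last:
--             kept.append(canon_last[k])
--
--     return "\n".join(kept).strip()
-- ===== SOURCE B (Python) =====
-- _CANON_VARS = [
--     "COMPANY_NAME",
--     "CALL_NUMBER",
--     "ADDRESS",
--     "STATE_NAME",
--     "LINK",
--     "COMPANY_EMPLOYEE",
--     "USER_MESSAGE",
-- ]
--
--
-- def _is_assignment(s: str) -> bool:
--     return " = " in s and s.split("=", 1)[0].strip().isidentifier()
--
--
-- def _strip_assignment_lines_keep_canon(prompt: str) -> str:
--     if not prompt:
--         return ""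
--     lines = prompt.splitlines()
--     # body: keep every line that does not look like an assignment
--     kept = [ln for ln in lines if not _is_assignment(ln.strip())]
--     # tail: for each canonical var, scan backwards for its last assignment
--     tail = []
--     for k in _CANON_VARS:
--         last = None
--         for ln in reversed(lines):
--             s = ln.strip()
--             if s.startswith(k + " ="):
--                 last = s
--                 break
--         if last is not None:
--             tail.append(last)
--     return "\n".join(kept + [""] + tail).strip()
-- ===== Notes on version B (the rewrite author's own statement) =====
-- stated objective: alternative
-- what changed: B drops A's dict entirely: it transposes the loop nesting, finding each canonical variable's last assignment by a per-key backward scan with early exit, builds the kept body with a filter comprehension, and joins body+tail in one concatenation.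
import Mathlib
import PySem

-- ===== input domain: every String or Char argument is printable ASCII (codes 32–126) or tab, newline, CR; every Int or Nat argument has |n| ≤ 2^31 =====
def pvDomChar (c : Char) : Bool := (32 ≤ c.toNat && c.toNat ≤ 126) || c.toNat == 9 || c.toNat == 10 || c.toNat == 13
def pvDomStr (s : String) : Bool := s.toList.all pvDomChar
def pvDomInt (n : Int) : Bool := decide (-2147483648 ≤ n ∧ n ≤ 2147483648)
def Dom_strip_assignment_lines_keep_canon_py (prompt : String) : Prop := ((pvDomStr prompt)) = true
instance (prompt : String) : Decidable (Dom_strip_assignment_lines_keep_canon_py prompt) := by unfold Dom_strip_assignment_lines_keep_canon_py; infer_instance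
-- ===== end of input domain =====

-- B rebuilds the canonical tail by a per-variable backward search over the lines
-- (no dict, transposed loop nesting, early exit) and filters the body with a
-- comprehension; objective: alternative decomposition, same asymptotic cost.

-- shared by both ports: the module constant _CANON_VARS
def pvCanonVars : List String :=
  ["COMPANY_NAME", "CALL_NUMBER", "ADDRESS", "STATE_NAME", "LINK",
   "COMPANY_EMPLOYEE", "USER_MESSAGE"]

-- str.isidentifier, exact on the ASCII domain: [A-Za-z_][A-Za-z0-9_]* (empty → False)
def pvIsIdent (s : String) : Bool :=
  match s.toList with
  | [] => false
  | c :: rest => (c.isAlpha || c == '_') && rest.all (fun c => c.isAlphanum || c == '_')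

-- shared by both ports: ' = ' in s and s.split('=',1)[0].strip().isidentifier()
-- (A writes it inline, B's helper _is_assignment is the same expression)
def pvIsAssign (s : String) : Bool :=
  PySem.Str.isIn " = " s &&
    pvIsIdent (PySem.Str.strip
      (match PySem.Str.splitMax? s "=" 1 with
       | some (p :: _) => p
       | _ => s))

-- ===== PORT A =====
def strip_assignment_lines_keep_canon_py (prompt : String) : String :=
  if prompt = "" then ""
  else
    let lines := PySem.Str.splitlines prompt
    let canon_last : PySem.Dict String String :=
      lines.foldl (fun d line =>
        pvCanonVars.foldl (fun d k =>
          if PySem.Str.startswith (PySem.Str.strip line) (k ++ " =")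
          then d.insert k (PySem.Str.strip line) else d) d)
        PySem.Dict.empty
    let kept : List String :=
      lines.foldl (fun kept line =>
        if pvIsAssign (PySem.Str.strip line) then kept else kept ++ [line]) []
    let kept := kept ++ [""]
    let kept := pvCanonVars.foldl (fun kept k =>
      match canon_last.get? k with
      | some v => kept ++ [v]
      | none => kept) kept
    PySem.Str.strip (PySem.Str.join "\n" kept)

-- ===== PORT B =====
-- 'last = None; for ln in reversed(lines): … last = s; break' = first hit in the reversed list
def pvFindCanonRev (k : String) : List String → Option String
  | [] => none
  | line :: rest =>
    if PySem.Str.startswith (PySem.Str.strip line) (k ++ " =")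
    then some (PySem.Str.strip line) else pvFindCanonRev k rest

def strip_assignment_lines_keep_canon_py_alt (prompt : String) : String :=
  if prompt = "" then ""
  else
    let lines := PySem.Str.splitlines prompt
    let kept : List String := lines.filter (fun ln => !pvIsAssign (PySem.Str.strip ln))
    let tail : List String :=
      pvCanonVars.foldl (fun tail k =>
        match pvFindCanonRev k lines.reverse with
        | some v => tail ++ [v]
        | none => tail) []
    PySem.Str.strip (PySem.Str.join "\n" (kept ++ [""] ++ tail))

-- ===== PRECONDITION & SPEC =====
def Spec_strip_assignment_lines_keep_canon_py (prompt : String) (out : String) : Prop := out = strip_assignment_lines_keep_canon_py_alt prompt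
instance (prompt : String) (out : String) : Decidable (Spec_strip_assignment_lines_keep_canon_py prompt out) := by unfold Spec_strip_assignment_lines_keep_canon_py; infer_instance

-- ===== CLAIM (what is proved, stated in full; the proofs are below) =====
def Claim_equal_strip_assignment_lines_keep_canon_py : Prop := ∀ (prompt : String), Dom_strip_assignment_lines_keep_canon_py prompt → Spec_strip_assignment_lines_keep_canon_py prompt (strip_assignment_lines_keep_canon_py prompt)

-- ===== LEMMAS AND PROOFS =====

-- effect of one of A's inner dict passes (any key list, any condition) on get?
theorem pv_inner_get (ks : List String) (d : PySem.Dict String String)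
    (cond : String → Bool) (s k : String) :
    (ks.foldl (fun d k' => if cond k' then d.insert k' s else d) d).get? k =
      if k ∈ ks ∧ cond k = true then some s else d.get? k := by
  induction ks generalizing d with
  | nil => simp
  | cons k' rest ih =>
    simp only [List.foldl_cons, ih]
    by_cases hmem : k ∈ rest ∧ cond k = true
    · simp [hmem, List.mem_cons]
    · simp only [if_neg hmem]
      by_cases hkk : k = k'
      · subst hkk
        by_cases hc : cond k = true
        · simp [hc, PySem.Dict.get?_insert_self]
        · simp at hc
          simp [hc]
      · have hiff : (k ∈ k' :: rest ∧ cond k = true) ↔ (k ∈ rest ∧ cond k = true) := by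
          simp [List.mem_cons, hkk]
        rw [if_congr hiff rfl rfl, if_neg hmem]
        by_cases hc : cond k' = true
        · simp [hc, PySem.Dict.get?_insert_of_ne _ _ hkk]
        · simp at hc; simp [hc]

-- B's backward search over xs ++ [x]: search xs first, then x
theorem pv_findRev_append (k : String) (xs : List String) (x : String) :
    pvFindCanonRev k (xs ++ [x]) =
      ((pvFindCanonRev k xs).orElse (fun _ => pvFindCanonRev k [x])) := by
  induction xs with
  | nil => simp only [List.nil_append, pvFindCanonRev, Option.orElse]
  | cons y ys ih =>
    simp only [List.cons_append, pvFindCanonRev, ih]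
    by_cases h : PySem.Str.startswith (PySem.Str.strip y) (k ++ " =") = true
    · rw [if_pos h, if_pos h]; rfl
    · rw [if_neg h, if_neg h]

-- A's dict after its first pass, read at a canonical key, is B's backward search
theorem pv_dict_get (lines : List String) (d : PySem.Dict String String) (k : String)
    (hk : k ∈ pvCanonVars) :
    (lines.foldl (fun d line =>
        pvCanonVars.foldl (fun d k =>
          if PySem.Str.startswith (PySem.Str.strip line) (k ++ " =")
          then d.insert k (PySem.Str.strip line) else d) d) d).get? k =
      ((pvFindCanonRev k lines.reverse).orElse (fun _ => d.get? k)) := by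
  induction lines generalizing d with
  | nil => simp [pvFindCanonRev, Option.orElse]
  | cons line rest ih =>
    simp only [List.foldl_cons, ih, List.reverse_cons, pv_findRev_append]
    rw [pv_inner_get pvCanonVars _
      (fun k' => PySem.Str.startswith (PySem.Str.strip line) (k' ++ " =")) (PySem.Str.strip line) k]
    cases pvFindCanonRev k rest.reverse with
    | some v => rfl
    | none =>
      simp only [Option.orElse, pvFindCanonRev]
      by_cases h : PySem.Str.startswith (PySem.Str.strip line) (k ++ " =") = true
      · rw [if_pos ⟨hk, h⟩, if_pos h]
      · rw [if_neg (fun hc => h hc.2), if_neg h]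

-- A's append-at-most-one-per-key tail fold factors through its accumulator
theorem pv_tail_factor (ks : List String) (o : String → Option String) (acc : List String) :
    ks.foldl (fun acc k => match o k with
      | some v => acc ++ [v]
      | none => acc) acc =
      acc ++ ks.foldl (fun acc k => match o k with
        | some v => acc ++ [v]
        | none => acc) [] := by
  induction ks generalizing acc with
  | nil => simp
  | cons k rest ih =>
    simp only [List.foldl_cons]
    cases h : o k with
    | none => exact ih acc
    | some v =>
      simp only [List.nil_append]
      rw [ih (acc ++ [v]), ih [v], List.append_assoc]

-- A's second pass is B's filter comprehension
theorem pv_kept (lines : List String) (acc : List String) :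
    lines.foldl (fun kept line =>
      if pvIsAssign (PySem.Str.strip line) then kept else kept ++ [line]) acc =
    acc ++ lines.filter (fun ln => !pvIsAssign (PySem.Str.strip ln)) := by
  have hf : (fun kept line =>
      if pvIsAssign (PySem.Str.strip line) then kept else kept ++ [line]) =
      (fun (kept : List String) line =>
        if (!pvIsAssign (PySem.Str.strip line)) = true then kept ++ [line] else kept) := by
    funext kept line
    cases pvIsAssign (PySem.Str.strip line) <;> simp
  rw [hf]
  exact PySem.List.foldl_append_if_eq_filter _ _ _

-- ===== VERDICT (by name: the statement is the Claim_ definition above) =====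
theorem strip_assignment_lines_keep_canon_py_spec : Claim_equal_strip_assignment_lines_keep_canon_py := by
  intro prompt _
  unfold Spec_strip_assignment_lines_keep_canon_py
  unfold strip_assignment_lines_keep_canon_py strip_assignment_lines_keep_canon_py_alt
  by_cases hp : prompt = ""
  · simp [hp]
  · simp only [if_neg hp]
    congr 1
    congr 1
    rw [pv_tail_factor, pv_kept]
    simp only [List.nil_append, List.append_assoc]
    congr 1
    congr 1
    apply PySem.List.foldl_congr_mem
    intro acc k hk
    rw [pv_dict_get _ _ _ hk]
    simp only [PySem.Dict.get?_empty]
    cases pvFindCanonRev k (PySem.Str.splitlines prompt).reverse <;> rfl
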